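-- pv_equiv track=rewrite | github.com/Github-Aiko/Learing-python | toan-nang-cao/th6/baitap.py | maximize_aesthetic
-- ===== SOURCE A (Python) =====
-- def maximize_aesthetic(n, k, v):
--     dp = [[0 for j in range(n+1)] for i in range(k+1)]
--     for i in range(1, k+1):
--         for j in range(i, n-k+i+1):
--             dp[i][j] = dp[i][j-1]
--             for p in range(i-1, j):
--                 dp[i][j] = max(dp[i][j], dp[i-1][p] + sum(v[q][j-1] for q in range(p, i-1, -1)))
--     return dp[k][n]
-- ===== SOURCE B (Python) =====
-- def maximize_aesthetic(n, k, v):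
--     # Per-column prefix sums over the transposed matrix replace the innermost
--     # segment-sum scan by a constant-time lookup; two rolling 1-D DP rows are kept.
--     pre = []
--     for col in zip(*v):
--         s = 0
--         pc = [0]
--         for x in col:
--             s += x
--             pc.append(s)
--         pre.append(pc)
--     prev = [0] * (n + 1)
--     for i in range(1, k + 1):
--         cur = [0] * (n + 1)
--         for j in range(i, n - k + i + 1):
--             pc = pre[j - 1]
--             base = pc[i]
--             best = cur[j - 1]
--             for p in range(i - 1, j):
--                 t = prev[p] + pc[p + 1] - base
--                 if t > best:
--                     best = t
--             cur[j] = best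
--         prev = cur
--     return prev[n]
-- ===== Notes on version B (the rewrite author's own statement) =====
-- stated objective: alternative
-- what changed: B precomputes per-column prefix sums over the transposed matrix so A's innermost segment-sum scan becomes an O(1) lookup, and keeps two rolling 1-D DP rows instead of the full (k+1)x(n+1) table.
-- outside the precondition, e.g. on maximize_aesthetic(2, 2, []): A returns 0, B raises IndexError
import Mathlib
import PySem

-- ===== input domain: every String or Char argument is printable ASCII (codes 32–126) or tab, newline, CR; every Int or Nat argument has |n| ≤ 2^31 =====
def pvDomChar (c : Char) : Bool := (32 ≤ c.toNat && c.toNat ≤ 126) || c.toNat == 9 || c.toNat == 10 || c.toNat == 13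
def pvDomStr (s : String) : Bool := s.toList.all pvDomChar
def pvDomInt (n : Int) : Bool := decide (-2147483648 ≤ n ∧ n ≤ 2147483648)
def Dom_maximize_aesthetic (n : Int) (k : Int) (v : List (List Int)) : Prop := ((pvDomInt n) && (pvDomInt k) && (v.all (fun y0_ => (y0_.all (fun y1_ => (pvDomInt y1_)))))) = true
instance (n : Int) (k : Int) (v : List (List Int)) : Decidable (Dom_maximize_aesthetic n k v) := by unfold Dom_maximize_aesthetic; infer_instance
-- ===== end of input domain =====

-- B replaces A's innermost segment-sum scan by precomputed per-column prefix sums and keeps two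
-- rolling 1-D DP rows instead of the full (k+1)x(n+1) table.

-- ===== PORT A =====
-- v[i][j] (both reads are in range under Pre_, where pyGetD is exact)
def pvGet2 (dp : List (List Int)) (i j : Int) : Int :=
  PySem.List.pyGetD (PySem.List.pyGetD dp i []) j 0

-- dp[i][j] = val (in range under Pre_)
def pvSet2 (dp : List (List Int)) (i j : Int) (val : Int) : List (List Int) :=
  PySem.List.pySetD dp i (PySem.List.pySetD (PySem.List.pyGetD dp i []) j val)

-- sum(v[q][c] for q in range(p, i-1, -1))
def pvDescSum (v : List (List Int)) (c p i : Int) : Int :=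
  (PySem.List.pyRange p (i-1) (-1)).foldl (fun s q => s + pvGet2 v q c) 0

-- body of A's p-loop: dp[i][j] = max(dp[i][j], dp[i-1][p] + sum(...))
def pvAStepP (v : List (List Int)) (i j : Int) (dp : List (List Int)) (p : Int) : List (List Int) :=
  pvSet2 dp i j (max (pvGet2 dp i j) (pvGet2 dp (i-1) p + pvDescSum v (j-1) p i))

-- body of A's j-loop
def pvAStepJ (v : List (List Int)) (i : Int) (dp : List (List Int)) (j : Int) : List (List Int) :=
  (PySem.List.pyRange (i-1) j 1).foldl (pvAStepP v i j) (pvSet2 dp i j (pvGet2 dp i (j-1)))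

-- body of A's i-loop
def pvAStepI (v : List (List Int)) (n k : Int) (dp : List (List Int)) (i : Int) : List (List Int) :=
  (PySem.List.pyRange i (n-k+i+1) 1).foldl (pvAStepJ v i) dp

def maximize_aesthetic (n : Int) (k : Int) (v : List (List Int)) : Int :=
  let dp0 : List (List Int) := List.replicate (k+1).toNat (List.replicate (n+1).toNat 0)
  pvGet2 ((PySem.List.pyRange 1 (k+1) 1).foldl (pvAStepI v n k) dp0) k n

-- ===== PORT B =====
-- zip(*v): list of columns, truncated at the shortest row (hand port of the zip builtin; exact:
-- yields columns while every remaining row is nonempty)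
def pvZipStar (v : List (List Int)) : List (List Int) :=
  if _h : v.isEmpty || v.any (·.isEmpty) then []
  else (v.map (fun r => r.headD 0)) :: pvZipStar (v.map List.tail)
  termination_by (v.headD []).length
  decreasing_by
    rcases v with _ | ⟨a, t⟩
    · simp at _h
    · have ha : a ≠ [] := by intro hcon; subst hcon; simp at _h
      have : 0 < a.length := List.length_pos_iff.mpr ha
      simp [List.length_tail]
      omega

-- s = 0; pc = [0]; for x in col: s += x; pc.append(s)
def pvBColPC (col : List Int) : List Int :=
  (col.foldl (fun (cs : List Int × Int) x => let s := cs.2 + x; (cs.1 ++ [s], s)) ([0], 0)).1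

-- pre = []; for col in zip(*v): ...; pre.append(pc)
def pvBPre (v : List (List Int)) : List (List Int) :=
  (pvZipStar v).foldl (fun pre col => pre ++ [pvBColPC col]) []

-- body of B's p-loop: t = prev[p] + pc[p+1] - base; if t > best: best = t
def pvBStepP (prev pc : List Int) (base : Int) (best : Int) (p : Int) : Int :=
  let t := PySem.List.pyGetD prev p 0 + PySem.List.pyGetD pc (p+1) 0 - base
  if best < t then t else best

-- body of B's j-loop: cur[j] = best
def pvBStepJ (pre : List (List Int)) (prev : List Int) (i : Int) (cur : List Int) (j : Int) : List Int :=
  let pc := PySem.List.pyGetD pre (j-1) []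
  let base := PySem.List.pyGetD pc i 0
  PySem.List.pySetD cur j
    ((PySem.List.pyRange (i-1) j 1).foldl (pvBStepP prev pc base) (PySem.List.pyGetD cur (j-1) 0))

-- body of B's i-loop: cur = [0]*(n+1); ...; prev = cur
def pvBStepI (pre : List (List Int)) (n k : Int) (prev : List Int) (i : Int) : List Int :=
  (PySem.List.pyRange i (n-k+i+1) 1).foldl (pvBStepJ pre prev i) (List.replicate (n+1).toNat 0)

def maximize_aesthetic_alt (n : Int) (k : Int) (v : List (List Int)) : Int :=
  let pre := pvBPre v
  let prev0 : List Int := List.replicate (n+1).toNat 0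
  PySem.List.pyGetD ((PySem.List.pyRange 1 (k+1) 1).foldl (pvBStepI pre n k) prev0) n 0

-- ===== PRECONDITION & SPEC =====
-- Pre_ excludes inputs where Python raises (negative n or k: an out-of-range dp index; with
-- 1 <= k <= n, a v that does not cover an n-column square: an out-of-range v/pre index). On the
-- degenerate shapes with k = n and v too small, A's loops happen never to touch v and A still
-- returns 0 while B's pre lookup raises IndexError, so those shapes fall outside too.
def Pre_maximize_aesthetic (n : Int) (k : Int) (v : List (List Int)) : Prop :=
  0 ≤ n ∧ 0 ≤ k ∧ (1 ≤ k → k ≤ n → (n ≤ (v.length : Int) ∧ ∀ r ∈ v, n ≤ (r.length : Int)))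
instance (n : Int) (k : Int) (v : List (List Int)) : Decidable (Pre_maximize_aesthetic n k v) := by
  unfold Pre_maximize_aesthetic; infer_instance

def pvWitness_maximize_aesthetic : Int × Int × List (List Int) := (2, 1, [[1, 2], [3, 4]])

def Spec_maximize_aesthetic (n : Int) (k : Int) (v : List (List Int)) (out : Int) : Prop := out = maximize_aesthetic_alt n k v
instance (n : Int) (k : Int) (v : List (List Int)) (out : Int) : Decidable (Spec_maximize_aesthetic n k v out) := by unfold Spec_maximize_aesthetic; infer_instance

-- ===== CLAIM (what is proved, stated in full; the proofs are below) =====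
def Claim_equal_maximize_aesthetic : Prop := ∀ (n : Int) (k : Int) (v : List (List Int)), Dom_maximize_aesthetic n k v → Pre_maximize_aesthetic n k v → Spec_maximize_aesthetic n k v (maximize_aesthetic n k v)

-- ===== LEMMAS AND PROOFS =====

-- S v c m = sum of column c over rows 0..m-1
def pvS (v : List (List Int)) (c m : Int) : Int :=
  ((PySem.List.pyRange 0 m 1).map (fun q => pvGet2 v q c)).sum

-- ----- generic get/set facts for Python-style indexing (indices known nonnegative) -----
lemma pv_getD_int {α : Type} (xs : List α) (i : Int) (d : α) (h0 : 0 ≤ i) :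
    PySem.List.pyGetD xs i d = xs.getD i.toNat d := by
  rw [← Int.toNat_of_nonneg h0, PySem.List.pyGetD_natCast, Int.toNat_natCast]

lemma pv_getD_setD_same {α : Type} (xs : List α) (j : Int) (x d : α) (h0 : 0 ≤ j)
    (hj : j < (xs.length : Int)) :
    PySem.List.pyGetD (PySem.List.pySetD xs j x) j d = x := by
  rw [PySem.List.pySetD_of_nonneg _ _ h0, pv_getD_int _ _ _ h0, List.getD_eq_getElem?_getD,
    List.getElem?_set_self (by omega)]
  rfl

lemma pv_getD_setD_other {α : Type} (xs : List α) (j m : Int) (x d : α) (h0j : 0 ≤ j)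
    (h0m : 0 ≤ m) (hm : m ≠ j) :
    PySem.List.pyGetD (PySem.List.pySetD xs j x) m d = PySem.List.pyGetD xs m d := by
  rw [PySem.List.pySetD_of_nonneg _ _ h0j, pv_getD_int _ _ _ h0m, pv_getD_int _ _ _ h0m,
    List.getD_eq_getElem?_getD, List.getD_eq_getElem?_getD,
    List.getElem?_set_ne (by omega : j.toNat ≠ m.toNat)]

lemma pv_setD_setD {α : Type} (xs : List α) (j : Int) (x y : α) (h0 : 0 ≤ j) :
    PySem.List.pySetD (PySem.List.pySetD xs j x) j y = PySem.List.pySetD xs j y := by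
  rw [PySem.List.pySetD_of_nonneg _ _ h0, PySem.List.pySetD_of_nonneg _ _ h0,
    PySem.List.pySetD_of_nonneg _ _ h0, List.set_set]

lemma pv_getD_mem {α : Type} (xs : List α) (i : Int) (d : α) (h0 : 0 ≤ i)
    (hi : i < (xs.length : Int)) :
    PySem.List.pyGetD xs i d ∈ xs := by
  rw [pv_getD_int _ _ _ h0, List.getD_eq_getElem?_getD,
    List.getElem?_eq_getElem (by omega : i.toNat < xs.length)]
  exact List.getElem_mem _

-- max as an if
lemma pv_if_max (b t : Int) : (if b < t then t else b) = max b t := by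
  rw [max_def]; split_ifs <;> omega

-- ----- prefix sums: characterization of B's pre table -----
lemma pvS_append (v : List (List Int)) (c a b : Int) (h0 : 0 ≤ a) (hab : a ≤ b) :
    pvS v c b = pvS v c a + ((PySem.List.pyRange a b 1).map (fun q => pvGet2 v q c)).sum := by
  unfold pvS
  rw [PySem.List.pyRange_one_append 0 a b h0 hab, List.map_append, List.sum_append]

-- the descending generator sum equals a prefix-sum difference
lemma pvDescSum_eq (v : List (List Int)) (c p i : Int) (h0 : 0 ≤ i) (hip : i ≤ p + 1) :
    pvDescSum v c p i = pvS v c (p+1) - pvS v c i := by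
  unfold pvDescSum
  rw [PySem.List.pyRange_neg_one_eq_reverse, show (i - 1 + 1 : Int) = i by ring,
    PySem.List.foldl_add (g := fun q => pvGet2 v q c), List.map_reverse, List.sum_reverse,
    pvS_append v c i (p+1) h0 hip]
  ring

-- ----- characterization of B's pre table -----
def pvVShape (n : Int) (v : List (List Int)) : Prop :=
  n ≤ (v.length : Int) ∧ ∀ r ∈ v, n ≤ (r.length : Int)

lemma pv_zip_cond (v : List (List Int)) (hlen : 0 < v.length) (hrows : ∀ r ∈ v, 0 < r.length) :
    ¬((v.isEmpty || v.any (·.isEmpty)) = true) := by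
  simp only [Bool.or_eq_true, List.any_eq_true, not_or, not_exists, not_and]
  constructor
  · simp only [List.isEmpty_iff]
    exact List.ne_nil_of_length_pos hlen
  · intro r hr
    simp only [List.isEmpty_iff]
    exact List.ne_nil_of_length_pos (hrows r hr)

lemma pvZipStar_getElem? : ∀ (c : Nat) (v : List (List Int)), 0 < v.length →
    (∀ r ∈ v, c < r.length) →
    (pvZipStar v)[c]? = some (v.map (fun r => r.getD c 0)) := by
  intro c
  induction c with
  | zero =>
    intro v hlen hrows
    rw [pvZipStar, dif_neg (pv_zip_cond v hlen (fun r hr => hrows r hr))]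
    simp only [List.getElem?_cons_zero, Option.some.injEq]
    apply List.map_congr_left
    intro r hr
    rcases r with _ | ⟨a, t⟩
    · exact absurd (hrows _ hr) (by simp)
    · rfl
  | succ c ih =>
    intro v hlen hrows
    rw [pvZipStar, dif_neg (pv_zip_cond v hlen (fun r hr => by have := hrows r hr; omega))]
    simp only [List.getElem?_cons_succ]
    rw [ih (v.map List.tail) (by simpa using hlen)
      (by intro r hr
          simp only [List.mem_map] at hr
          obtain ⟨r0, hr0, rfl⟩ := hr
          have := hrows _ hr0
          simp only [List.length_tail]
          omega)]
    simp only [Option.some.injEq, List.map_map]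
    apply List.map_congr_left
    intro r hr
    rcases r with _ | ⟨a, t⟩
    · exact absurd (hrows _ hr) (by simp)
    · rfl

lemma pv_colfold (col : List Int) : ∀ (acc : List Int) (s : Int),
    col.foldl (fun (cs : List Int × Int) x => (cs.1 ++ [cs.2 + x], cs.2 + x)) (acc, s)
      = (acc ++ (List.range col.length).map (fun m => s + (col.take (m+1)).sum), s + col.sum) := by
  induction col with
  | nil => intro acc s; simp
  | cons x xs ih =>
    intro acc s
    simp only [List.foldl_cons]
    rw [ih (acc ++ [s + x]) (s + x), Prod.mk.injEq]
    constructor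
    · rw [List.append_assoc]
      congr 1
      simp only [List.length_cons]
      rw [List.range_succ_eq_map, List.map_cons, List.map_map]
      simp only [List.take_succ_cons, List.sum_cons, List.take_zero, List.sum_nil,
        List.singleton_append, List.cons.injEq]
      refine ⟨by ring, ?_⟩
      apply List.map_congr_left
      intro m _
      simp only [Function.comp_apply]
      ring
    · simp only [List.sum_cons]; ring

lemma pvBColPC_eq (col : List Int) :
    pvBColPC col = (List.range (col.length + 1)).map (fun m => (col.take m).sum) := by
  unfold pvBColPC
  rw [show (fun (cs : List Int × Int) x => let s := cs.2 + x; (cs.1 ++ [s], s))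
      = (fun (cs : List Int × Int) x => (cs.1 ++ [cs.2 + x], cs.2 + x)) from rfl,
    pv_colfold col [0] 0]
  rw [List.range_succ_eq_map, List.map_cons, List.map_map]
  simp only [List.take_zero, List.sum_nil, List.singleton_append]
  congr 1
  apply List.map_congr_left
  intro m _
  simp

lemma pvS_eq_take (v : List (List Int)) (c m : Int) (hc0 : 0 ≤ c) (hm0 : 0 ≤ m)
    (hmv : m ≤ (v.length : Int)) :
    pvS v c m = (((v.map (fun r => r.getD c.toNat 0)).take m.toNat)).sum := by
  unfold pvS
  have hlist : (PySem.List.pyRange 0 m 1).map (fun q => pvGet2 v q c)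
      = ((v.map (fun r => r.getD c.toNat 0)).take m.toNat) := by
    apply List.ext_getElem
    · simp only [List.length_map, PySem.List.length_pyRange_one, List.length_take]
      omega
    · intro idx h1 h2
      simp only [List.length_map, PySem.List.length_pyRange_one] at h1
      simp only [List.getElem_map, PySem.List.getElem_pyRange_one, List.getElem_take]
      unfold pvGet2
      rw [pv_getD_int _ _ _ (by omega : (0:Int) ≤ 0 + (idx:Int)), pv_getD_int _ _ _ hc0]
      have hidx : ((0:Int) + (idx:Int)).toNat = idx := by omega
      rw [hidx]
      simp [List.getD_eq_getElem?_getD, List.getElem?_eq_getElem (show idx < v.length by omega)]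
  rw [hlist]

lemma pvPre_get (v : List (List Int)) (n c m : Int) (hvs : pvVShape n v) (hc0 : 0 ≤ c)
    (hcn : c < n) (hm0 : 0 ≤ m) (hmn : m ≤ n) :
    PySem.List.pyGetD (PySem.List.pyGetD (pvBPre v) c []) m 0 = pvS v c m := by
  obtain ⟨hvlen, hrows⟩ := hvs
  have hvpos : 0 < v.length := by omega
  have hcol : (pvZipStar v)[c.toNat]? = some (v.map (fun r => r.getD c.toNat 0)) :=
    pvZipStar_getElem? c.toNat v hvpos
      (fun r hr => by have := hrows r hr; omega)
  unfold pvBPre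
  rw [PySem.List.foldl_append_singleton_eq_map (f := pvBColPC), List.nil_append,
    pv_getD_int _ _ _ hc0, List.getD_eq_getElem?_getD, List.getElem?_map, hcol]
  simp only [Option.map_some, Option.getD_some]
  rw [pvBColPC_eq, pv_getD_int _ _ _ hm0, List.getD_eq_getElem?_getD, List.getElem?_map,
    List.getElem?_range (by simp [List.length_map]; omega : m.toNat < (v.map
      (fun r => r.getD c.toNat 0)).length + 1)]
  simp only [Option.map_some, Option.getD_some]
  rw [pvS_eq_take v c m hc0 hm0 (by omega)]

-- ----- shape and invariants -----
def pvZeroRow (n : Int) : List Int := List.replicate (n+1).toNat 0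

def pvShape (n k : Int) (dp : List (List Int)) : Prop :=
  (dp.length : Int) = k+1 ∧ ∀ row ∈ dp, (row.length : Int) = n+1

def pvInvJ (n k i : Int) (prev : List Int) (dp : List (List Int)) (cur : List Int) : Prop :=
  pvShape n k dp ∧ PySem.List.pyGetD dp i [] = cur ∧ PySem.List.pyGetD dp (i-1) [] = prev ∧
    ∀ r : Int, i < r → r ≤ k → PySem.List.pyGetD dp r [] = pvZeroRow n

def pvInvI (n k m : Int) (dp : List (List Int)) (prev : List Int) : Prop :=
  pvShape n k dp ∧ PySem.List.pyGetD dp m [] = prev ∧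
    ∀ r : Int, m < r → r ≤ k → PySem.List.pyGetD dp r [] = pvZeroRow n

lemma pv_len_set2 (dp : List (List Int)) (i j x : Int) :
    (pvSet2 dp i j x).length = dp.length := by
  unfold pvSet2; exact PySem.List.length_pySetD ..

lemma pv_set2_row_same (dp : List (List Int)) (i j x : Int) (h0 : 0 ≤ i)
    (hi : i < (dp.length : Int)) :
    PySem.List.pyGetD (pvSet2 dp i j x) i [] =
      PySem.List.pySetD (PySem.List.pyGetD dp i []) j x := by
  unfold pvSet2; exact pv_getD_setD_same _ _ _ _ h0 hi

lemma pv_set2_row_other (dp : List (List Int)) (i j x r : Int) (h0i : 0 ≤ i) (h0r : 0 ≤ r)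
    (hr : r ≠ i) :
    PySem.List.pyGetD (pvSet2 dp i j x) r [] = PySem.List.pyGetD dp r [] := by
  unfold pvSet2; exact pv_getD_setD_other _ _ _ _ _ h0i h0r hr

lemma pv_shape_set2 (n k i j x : Int) (dp : List (List Int)) (h : pvShape n k dp)
    (h0 : 0 ≤ i) (hik : i < k+1) : pvShape n k (pvSet2 dp i j x) := by
  obtain ⟨hl, hr⟩ := h
  constructor
  · rw [pv_len_set2]; exact hl
  · intro row hrow
    unfold pvSet2 at hrow
    rw [PySem.List.pySetD_of_nonneg _ _ h0] at hrow
    rcases List.mem_or_eq_of_mem_set hrow with h1 | h1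
    · exact hr _ h1
    · subst h1
      rw [PySem.List.length_pySetD]
      exact hr _ (pv_getD_mem dp i [] h0 (by omega))

lemma pv_get2_set2_same (dp : List (List Int)) (i j x : Int) (h0i : 0 ≤ i)
    (hi : i < (dp.length : Int)) (h0j : 0 ≤ j)
    (hj : j < ((PySem.List.pyGetD dp i []).length : Int)) :
    pvGet2 (pvSet2 dp i j x) i j = x := by
  unfold pvGet2
  rw [pv_set2_row_same dp i j x h0i hi]
  exact pv_getD_setD_same _ _ _ _ h0j hj

lemma pv_get2_set2_row_other (dp : List (List Int)) (i j x r c : Int) (h0i : 0 ≤ i)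
    (h0r : 0 ≤ r) (hne : r ≠ i) :
    pvGet2 (pvSet2 dp i j x) r c = pvGet2 dp r c := by
  unfold pvGet2
  rw [pv_set2_row_other dp i j x r h0i h0r hne]

lemma pv_set2_set2 (dp : List (List Int)) (i j x y : Int) (h0i : 0 ≤ i)
    (hi : i < (dp.length : Int)) (h0j : 0 ≤ j) :
    pvSet2 (pvSet2 dp i j x) i j y = pvSet2 dp i j y := by
  unfold pvSet2
  rw [pv_getD_setD_same _ _ _ _ h0i hi, pv_setD_setD _ _ _ _ h0j, pv_setD_setD _ _ _ _ h0i]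

-- A's p-loop only rewrites cell (i,j): it collapses to one write of a running max
lemma pv_pfold (v : List (List Int)) (i j : Int) (dp : List (List Int))
    (h1i : 1 ≤ i) (hi : i < (dp.length : Int)) (h0j : 0 ≤ j)
    (hj : j < ((PySem.List.pyGetD dp i []).length : Int)) :
    ∀ (ps : List Int) (b : Int),
      ps.foldl (pvAStepP v i j) (pvSet2 dp i j b)
        = pvSet2 dp i j
            (ps.foldl (fun b p => max b (pvGet2 dp (i-1) p + pvDescSum v (j-1) p i)) b) := by
  intro ps
  induction ps with
  | nil => intro b; rfl
  | cons p ps ih =>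
    intro b
    simp only [List.foldl_cons]
    have hstep : pvAStepP v i j (pvSet2 dp i j b) p
        = pvSet2 dp i j (max b (pvGet2 dp (i-1) p + pvDescSum v (j-1) p i)) := by
      unfold pvAStepP
      rw [pv_get2_set2_same dp i j b (by omega) hi h0j hj,
        pv_get2_set2_row_other dp i j b (i-1) p (by omega) (by omega) (by omega),
        pv_set2_set2 dp i j b _ (by omega) hi h0j]
    rw [hstep, ih]

-- one iteration of the j-loop preserves the row correspondence
lemma pv_stepJ (v : List (List Int)) (n k i j : Int) (prev : List Int) (dp : List (List Int)) (cur : List Int)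
    (hvs : pvVShape n v) (h1i : 1 ≤ i) (hik : i ≤ k) (hij : i ≤ j) (hjb : j ≤ n-k+i)
    (hinv : pvInvJ n k i prev dp cur) :
    pvInvJ n k i prev (pvAStepJ v i dp j) (pvBStepJ (pvBPre v) prev i cur j) := by
  obtain ⟨⟨hlen, hrows⟩, hcur, hprev, hzero⟩ := hinv
  have hjn : j ≤ n := by omega
  have hi_len : i < (dp.length : Int) := by omega
  have hrowlen : ((PySem.List.pyGetD dp i []).length : Int) = n+1 :=
    hrows _ (pv_getD_mem dp i [] (by omega) hi_len)
  have hj_len : j < ((PySem.List.pyGetD dp i []).length : Int) := by omega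
  have hinit : PySem.List.pyGetD cur (j-1) 0 = pvGet2 dp i (j-1) := by
    unfold pvGet2; rw [hcur]
  have hfold :
      (PySem.List.pyRange (i-1) j 1).foldl
          (pvBStepP prev (PySem.List.pyGetD (pvBPre v) (j-1) [])
            (PySem.List.pyGetD (PySem.List.pyGetD (pvBPre v) (j-1) []) i 0))
          (PySem.List.pyGetD cur (j-1) 0)
        = (PySem.List.pyRange (i-1) j 1).foldl
            (fun b p => max b (pvGet2 dp (i-1) p + pvDescSum v (j-1) p i))
            (pvGet2 dp i (j-1)) := by
    rw [hinit]
    apply PySem.List.foldl_congr_mem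
    intro acc p hp
    rw [PySem.List.mem_pyRange_one] at hp
    unfold pvBStepP
    have h1 : PySem.List.pyGetD (PySem.List.pyGetD (pvBPre v) (j-1) []) i 0 = pvS v (j-1) i :=
      pvPre_get v n (j-1) i hvs (by omega) (by omega) (by omega) (by omega)
    have h2 : PySem.List.pyGetD (PySem.List.pyGetD (pvBPre v) (j-1) []) (p+1) 0
        = pvS v (j-1) (p+1) :=
      pvPre_get v n (j-1) (p+1) hvs (by omega) (by omega) (by omega) (by omega)
    have h3 : pvGet2 dp (i-1) p = PySem.List.pyGetD prev p 0 := by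
      unfold pvGet2; rw [hprev]
    rw [h1, h2, pv_if_max, h3, pvDescSum_eq v (j-1) p i (by omega) (by omega)]
    congr 1
    ring
  have hA : pvAStepJ v i dp j
      = pvSet2 dp i j
          ((PySem.List.pyRange (i-1) j 1).foldl
            (fun b p => max b (pvGet2 dp (i-1) p + pvDescSum v (j-1) p i))
            (pvGet2 dp i (j-1))) := by
    unfold pvAStepJ
    exact pv_pfold v i j dp h1i hi_len (by omega) hj_len _ _
  have hB : pvBStepJ (pvBPre v) prev i cur j
      = PySem.List.pySetD cur j
          ((PySem.List.pyRange (i-1) j 1).foldl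
            (fun b p => max b (pvGet2 dp (i-1) p + pvDescSum v (j-1) p i))
            (pvGet2 dp i (j-1))) := by
    simp only [pvBStepJ]
    rw [hfold]
  rw [hA, hB]
  refine ⟨pv_shape_set2 n k i j _ dp ⟨hlen, hrows⟩ (by omega) (by omega), ?_, ?_, ?_⟩
  · rw [pv_set2_row_same dp i j _ (by omega) hi_len, hcur]
  · rw [pv_set2_row_other dp i j _ (i-1) (by omega) (by omega) (by omega)]
    exact hprev
  · intro r hr1 hr2
    rw [pv_set2_row_other dp i j _ r (by omega) (by omega) (by omega)]
    exact hzero r hr1 hr2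

lemma pv_jloop (v : List (List Int)) (n k i : Int) (prev : List Int)
    (hvsc : 1 ≤ k → k ≤ n → pvVShape n v) (h1i : 1 ≤ i) (hik : i ≤ k) :
    ∀ (d : Nat) (a : Int) (dp : List (List Int)) (cur : List Int), i ≤ a →
      (n-k+i+1 - a).toNat = d → pvInvJ n k i prev dp cur →
      pvInvJ n k i prev ((PySem.List.pyRange a (n-k+i+1) 1).foldl (pvAStepJ v i) dp)
        ((PySem.List.pyRange a (n-k+i+1) 1).foldl (pvBStepJ (pvBPre v) prev i) cur) := by
  intro d
  induction d with
  | zero =>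
    intro a dp cur ha hd hinv
    rw [PySem.List.pyRange_one_eq_nil (by omega)]
    exact hinv
  | succ d ih =>
    intro a dp cur ha hd hinv
    rw [PySem.List.pyRange_one_cons (by omega : a < n-k+i+1)]
    simp only [List.foldl_cons]
    exact ih (a+1) _ _ (by omega) (by omega)
      (pv_stepJ v n k i a prev dp cur (hvsc (by omega) (by omega)) h1i hik ha (by omega) hinv)

lemma pv_stepI (v : List (List Int)) (n k m : Int) (dp : List (List Int)) (prev : List Int)
    (hvsc : 1 ≤ k → k ≤ n → pvVShape n v) (h0m : 0 ≤ m) (hmk : m < k) (hinv : pvInvI n k m dp prev) :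
    pvInvI n k (m+1) (pvAStepI v n k dp (m+1)) (pvBStepI (pvBPre v) n k prev (m+1)) := by
  obtain ⟨hsh, hrow, hz⟩ := hinv
  have hinvJ : pvInvJ n k (m+1) prev dp (pvZeroRow n) := by
    refine ⟨hsh, hz (m+1) (by omega) (by omega), ?_, fun r h1 h2 => hz r (by omega) h2⟩
    rw [show (m+1-1 : Int) = m by ring]
    exact hrow
  have h := pv_jloop v n k (m+1) prev hvsc (by omega) (by omega)
    ((n-k+(m+1)+1 - (m+1)).toNat) (m+1) dp (pvZeroRow n) (by omega) rfl hinvJ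
  obtain ⟨hsh', hcur', _, hz'⟩ := h
  exact ⟨hsh', hcur', fun r h1 h2 => hz' r h1 h2⟩

lemma pv_iloop (v : List (List Int)) (n k : Int)
    (hvsc : 1 ≤ k → k ≤ n → pvVShape n v) :
    ∀ (d : Nat) (a : Int) (dp : List (List Int)) (prev : List Int), 0 ≤ a → a ≤ k →
      (k - a).toNat = d → pvInvI n k a dp prev →
      pvInvI n k k ((PySem.List.pyRange (a+1) (k+1) 1).foldl (pvAStepI v n k) dp)
        ((PySem.List.pyRange (a+1) (k+1) 1).foldl (pvBStepI (pvBPre v) n k) prev) := by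
  intro d
  induction d with
  | zero =>
    intro a dp prev h0 hak hd hinv
    have : a = k := by omega
    subst this
    rw [PySem.List.pyRange_one_eq_nil (by omega)]
    exact hinv
  | succ d ih =>
    intro a dp prev h0 hak hd hinv
    rw [PySem.List.pyRange_one_cons (by omega : a+1 < k+1)]
    simp only [List.foldl_cons]
    exact ih (a+1) _ _ (by omega) (by omega) (by omega)
      (pv_stepI v n k a dp prev hvsc h0 (by omega) hinv)

lemma pv_inv0 (n k : Int) (hn : 0 ≤ n) (hk : 0 ≤ k) :
    pvInvI n k 0 (List.replicate (k+1).toNat (List.replicate (n+1).toNat 0))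
      (List.replicate (n+1).toNat 0) := by
  have hget : ∀ r : Int, 0 ≤ r → r ≤ k →
      PySem.List.pyGetD (List.replicate (k+1).toNat (List.replicate (n+1).toNat (0:Int))) r []
        = List.replicate (n+1).toNat 0 := by
    intro r h0 hrk
    rw [pv_getD_int _ _ _ h0, List.getD_eq_getElem?_getD,
      List.getElem?_replicate_of_lt (by omega : r.toNat < (k+1).toNat)]
    rfl
  refine ⟨⟨?_, ?_⟩, hget 0 le_rfl hk, fun r h1 h2 => hget r (by omega) h2⟩
  · rw [List.length_replicate]; omega
  · intro row hrow
    rw [List.eq_of_mem_replicate hrow, List.length_replicate]; omega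

-- ===== VERDICT (by name: the statement is the Claim_ definition above) =====
theorem maximize_aesthetic_spec : Claim_equal_maximize_aesthetic := by
  intro n k v _ hpre
  obtain ⟨hn, hk, hvsc⟩ := hpre
  unfold Spec_maximize_aesthetic maximize_aesthetic maximize_aesthetic_alt
  have h := pv_iloop v n k hvsc (k - 0).toNat 0
    (List.replicate (k+1).toNat (List.replicate (n+1).toNat 0))
    (List.replicate (n+1).toNat 0) le_rfl hk rfl (pv_inv0 n k hn hk)
  rw [show ((0:Int)+1) = 1 by ring] at h
  obtain ⟨_, hrowk, _⟩ := h
  show pvGet2 _ k n = _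
  unfold pvGet2
  rw [hrowk]
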